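-- pv_equiv track=rewrite | github.com/ShawnXiha/AutoTeaKG_Silver | scripts/generate_v4_graph_query_case_study.py | make_simplified_table
-- ===== SOURCE A (Python) =====
-- def make_simplified_table(rows):
--     out = []
--     for row in rows:
--         out.append(
--             {
--                 "record_id": row.get("record_id", ""),
--                 "paper_id": row.get("paper_id", ""),
--                 "tea_type": row.get("tea_type", ""),
--                 "component_group": row.get("component_group", ""),
--                 "mechanism_or_path": row.get("mechanism_label", ""),
--                 "microbial_metabolite": row.get("microbial_metabolite", ""),
--                 "host_phenotype": row.get("host_phenotype", ""),
--                 "evidence_level": row.get("evidence_level", ""),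
--                 "uncertainty_class": row.get("uncertainty_class", ""),
--             }
--         )
--     return out
-- ===== SOURCE B (Python) =====
-- # Source-key -> output-key rename map (identity except mechanism_label).
-- SRC_TO_OUT = {
--     "record_id": "record_id",
--     "paper_id": "paper_id",
--     "tea_type": "tea_type",
--     "component_group": "component_group",
--     "mechanism_label": "mechanism_or_path",
--     "microbial_metabolite": "microbial_metabolite",
--     "host_phenotype": "host_phenotype",
--     "evidence_level": "evidence_level",
--     "uncertainty_class": "uncertainty_class",
-- }
-- OUT_KEYS = [
--     "record_id", "paper_id", "tea_type", "component_group",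
--     "mechanism_or_path", "microbial_metabolite", "host_phenotype",
--     "evidence_level", "uncertainty_class",
-- ]
--
-- def _fill(found, k, v):
--     out_key = SRC_TO_OUT.get(k)
--     if out_key is not None and out_key not in found:
--         found[out_key] = v
--     return found
--
-- def _simplify(row):
--     # Scan the row's own items once, keeping the first value for each
--     # wanted field, then render the fixed template in output-key order.
--     found = {}
--     for k, v in row.items():
--         found = _fill(found, k, v)
--     return {k: found.get(k, "") for k in OUT_KEYS}
--
-- def make_simplified_table(rows):
--     return [_simplify(row) for row in rows]
-- ===== Notes on version B (the rewrite author's own statement) =====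
-- stated objective: alternative
-- what changed: Instead of nine key-driven lookups into each row, B scans each row's own items once, filtering/renaming wanted fields into a first-occurrence-wins accumulator, then renders a fixed nine-key template from that accumulator.
import Mathlib
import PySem

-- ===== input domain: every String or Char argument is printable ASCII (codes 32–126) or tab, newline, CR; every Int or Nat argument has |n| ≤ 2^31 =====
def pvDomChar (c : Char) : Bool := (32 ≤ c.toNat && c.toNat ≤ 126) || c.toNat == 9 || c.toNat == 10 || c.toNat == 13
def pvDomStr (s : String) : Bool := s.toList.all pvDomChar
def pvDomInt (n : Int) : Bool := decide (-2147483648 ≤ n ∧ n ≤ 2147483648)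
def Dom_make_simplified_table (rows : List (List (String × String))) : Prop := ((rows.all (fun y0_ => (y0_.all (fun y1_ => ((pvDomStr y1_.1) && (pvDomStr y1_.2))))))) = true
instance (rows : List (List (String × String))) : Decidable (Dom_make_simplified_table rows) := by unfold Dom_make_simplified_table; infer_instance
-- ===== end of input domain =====

-- B scans each row's own items once into a first-occurrence-wins accumulator and then renders a fixed field template, instead of A's nine key-driven lookups per row (objective: alternative; no speed claim).


-- ===== PORT A =====
def make_simplified_table (rows : List (List (String × String))) : List (List (String × String)) :=
  rows.foldl
    (fun out row =>
      out ++ [[("record_id", (PySem.Dict.mk row).getD "record_id" ""),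
               ("paper_id", (PySem.Dict.mk row).getD "paper_id" ""),
               ("tea_type", (PySem.Dict.mk row).getD "tea_type" ""),
               ("component_group", (PySem.Dict.mk row).getD "component_group" ""),
               ("mechanism_or_path", (PySem.Dict.mk row).getD "mechanism_label" ""),
               ("microbial_metabolite", (PySem.Dict.mk row).getD "microbial_metabolite" ""),
               ("host_phenotype", (PySem.Dict.mk row).getD "host_phenotype" ""),
               ("evidence_level", (PySem.Dict.mk row).getD "evidence_level" ""),
               ("uncertainty_class", (PySem.Dict.mk row).getD "uncertainty_class" "")]])
    []

-- ===== PORT B =====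
-- source key -> output key rename map (identity except mechanism_label)
def SRC_TO_OUT : PySem.Dict String String :=
  PySem.Dict.mk
    [("record_id", "record_id"), ("paper_id", "paper_id"), ("tea_type", "tea_type"),
     ("component_group", "component_group"), ("mechanism_label", "mechanism_or_path"),
     ("microbial_metabolite", "microbial_metabolite"), ("host_phenotype", "host_phenotype"),
     ("evidence_level", "evidence_level"), ("uncertainty_class", "uncertainty_class")]

def OUT_KEYS : List String :=
  ["record_id", "paper_id", "tea_type", "component_group", "mechanism_or_path",
   "microbial_metabolite", "host_phenotype", "evidence_level", "uncertainty_class"]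

-- _fill: record kv under its renamed key unless that field is already set
def fill (found : PySem.Dict String String) (k v : String) : PySem.Dict String String :=
  match SRC_TO_OUT.get? k with
  | some outKey => if found.contains outKey then found else found.insert outKey v
  | none => found

-- _simplify: one scan over the row's items, then render the template
def simplifyRow (row : List (String × String)) : List (String × String) :=
  let found := row.foldl (fun found kv => fill found kv.1 kv.2) PySem.Dict.empty
  OUT_KEYS.map (fun k => (k, found.getD k ""))

def make_simplified_table_alt (rows : List (List (String × String))) : List (List (String × String)) :=
  rows.map simplifyRow

-- ===== PRECONDITION & SPEC =====
def Spec_make_simplified_table (rows : List (List (String × String))) (out : List (List (String × String))) : Prop := out = make_simplified_table_alt rows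
instance (rows : List (List (String × String))) (out : List (List (String × String))) : Decidable (Spec_make_simplified_table rows out) := by unfold Spec_make_simplified_table; infer_instance

-- ===== CLAIM =====
def Claim_equal_make_simplified_table : Prop := ∀ (rows : List (List (String × String))), Dom_make_simplified_table rows → Spec_make_simplified_table rows (make_simplified_table rows)

-- ===== LEMMAS AND PROOFS =====

-- The fill loop realises first-match lookup: for an (outKey, srcKey) pair of the
-- rename map, what the loop records at outKey is the accumulator's value, or else
-- the first value at srcKey in the row.
theorem fill_loop_get? (ok sk : String)
    (hmap : ∀ k, SRC_TO_OUT.get? k = some ok ↔ k = sk) :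
    ∀ (row : List (String × String)) (d : PySem.Dict String String),
      (row.foldl (fun found kv => fill found kv.1 kv.2) d).get? ok
        = ((d.get? ok).or ((PySem.Dict.mk row).get? sk)) := by
  intro row
  induction row with
  | nil =>
    intro d
    have hnil : (PySem.Dict.mk ([] : List (String × String))).get? sk = none := rfl
    cases h : d.get? ok <;> simp [List.foldl, hnil, h, Option.or]
  | cons kv rest ih =>
    intro d
    obtain ⟨k, v⟩ := kv
    rw [List.foldl_cons]
    by_cases hk : k = sk
    · subst hk
      have hsome : SRC_TO_OUT.get? k = some ok := (hmap k).mpr rfl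
      by_cases hc : d.contains ok
      · have hfd : fill d k v = d := by simp [fill, hsome, hc]
        have hs : (d.get? ok).isSome := by
          rw [← PySem.Dict.contains_eq_isSome_get?]; exact hc
        obtain ⟨w, hw⟩ := Option.isSome_iff_exists.mp hs
        rw [hfd, ih d]
        simp [hw, Option.or]
      · have hfd : fill d k v = d.insert ok v := by simp [fill, hsome, hc]
        have hn : d.get? ok = none := by
          have hcon := PySem.Dict.contains_eq_isSome_get? (d := d) (k := ok)
          rw [hcon] at hc
          simpa using Option.not_isSome_iff_eq_none.mp (by simpa using hc)
        rw [hfd, ih (d.insert ok v)]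
        simp [PySem.Dict.get?_insert_self, hn, PySem.Dict.get?_mk_cons, Option.or]
    · have hrest : (PySem.Dict.mk ((k, v) :: rest)).get? sk = (PySem.Dict.mk rest).get? sk := by
        rw [PySem.Dict.get?_mk_cons]
        simp [show (k == sk) = false by simpa using hk]
      cases h : SRC_TO_OUT.get? k with
      | none =>
        have hfd : fill d k v = d := by simp [fill, h]
        rw [hfd, ih d, hrest]
      | some ok' =>
        have hne : ok' ≠ ok := by
          intro he; subst he
          exact hk ((hmap k).mp h)
        by_cases hc : d.contains ok'
        · have hfd : fill d k v = d := by simp [fill, h, hc]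
          rw [hfd, ih d, hrest]
        · have hfd : fill d k v = d.insert ok' v := by simp [fill, h, hc]
          rw [hfd, ih (d.insert ok' v), hrest, PySem.Dict.get?_insert_of_ne d v (Ne.symm hne)]

theorem simplifyRow_getD (ok sk : String) (row : List (String × String))
    (hmap : ∀ k, SRC_TO_OUT.get? k = some ok ↔ k = sk) :
    (row.foldl (fun found kv => fill found kv.1 kv.2) PySem.Dict.empty).getD ok ""
      = (PySem.Dict.mk row).getD sk "" := by
  rw [PySem.Dict.getD_eq_get?_getD, PySem.Dict.getD_eq_get?_getD,
      fill_loop_get? ok sk hmap]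
  simp [Option.or]

-- the nine rename-map facts, each provable by unfolding the literal dict
theorem hmap_record_id : ∀ k, SRC_TO_OUT.get? k = some "record_id" ↔ k = "record_id" := by
  intro k
  simp only [SRC_TO_OUT, PySem.Dict.get?_mk_cons, beq_iff_eq]
  split_ifs <;> (try subst_vars) <;> simp_all [PySem.Dict.get?, List.find?] <;> simp_all [eq_comm]

theorem hmap_paper_id : ∀ k, SRC_TO_OUT.get? k = some "paper_id" ↔ k = "paper_id" := by
  intro k
  simp only [SRC_TO_OUT, PySem.Dict.get?_mk_cons, beq_iff_eq]
  split_ifs <;> (try subst_vars) <;> simp_all [PySem.Dict.get?, List.find?] <;> simp_all [eq_comm]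

theorem hmap_tea_type : ∀ k, SRC_TO_OUT.get? k = some "tea_type" ↔ k = "tea_type" := by
  intro k
  simp only [SRC_TO_OUT, PySem.Dict.get?_mk_cons, beq_iff_eq]
  split_ifs <;> (try subst_vars) <;> simp_all [PySem.Dict.get?, List.find?] <;> simp_all [eq_comm]

theorem hmap_component_group : ∀ k, SRC_TO_OUT.get? k = some "component_group" ↔ k = "component_group" := by
  intro k
  simp only [SRC_TO_OUT, PySem.Dict.get?_mk_cons, beq_iff_eq]
  split_ifs <;> (try subst_vars) <;> simp_all [PySem.Dict.get?, List.find?] <;> simp_all [eq_comm]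

theorem hmap_mechanism_or_path : ∀ k, SRC_TO_OUT.get? k = some "mechanism_or_path" ↔ k = "mechanism_label" := by
  intro k
  simp only [SRC_TO_OUT, PySem.Dict.get?_mk_cons, beq_iff_eq]
  split_ifs <;> (try subst_vars) <;> simp_all [PySem.Dict.get?, List.find?] <;> simp_all [eq_comm]

theorem hmap_microbial_metabolite : ∀ k, SRC_TO_OUT.get? k = some "microbial_metabolite" ↔ k = "microbial_metabolite" := by
  intro k
  simp only [SRC_TO_OUT, PySem.Dict.get?_mk_cons, beq_iff_eq]
  split_ifs <;> (try subst_vars) <;> simp_all [PySem.Dict.get?, List.find?] <;> simp_all [eq_comm]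

theorem hmap_host_phenotype : ∀ k, SRC_TO_OUT.get? k = some "host_phenotype" ↔ k = "host_phenotype" := by
  intro k
  simp only [SRC_TO_OUT, PySem.Dict.get?_mk_cons, beq_iff_eq]
  split_ifs <;> (try subst_vars) <;> simp_all [PySem.Dict.get?, List.find?] <;> simp_all [eq_comm]

theorem hmap_evidence_level : ∀ k, SRC_TO_OUT.get? k = some "evidence_level" ↔ k = "evidence_level" := by
  intro k
  simp only [SRC_TO_OUT, PySem.Dict.get?_mk_cons, beq_iff_eq]
  split_ifs <;> (try subst_vars) <;> simp_all [PySem.Dict.get?, List.find?] <;> simp_all [eq_comm]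

theorem hmap_uncertainty_class : ∀ k, SRC_TO_OUT.get? k = some "uncertainty_class" ↔ k = "uncertainty_class" := by
  intro k
  simp only [SRC_TO_OUT, PySem.Dict.get?_mk_cons, beq_iff_eq]
  split_ifs <;> (try subst_vars) <;> simp_all [PySem.Dict.get?, List.find?] <;> simp_all [eq_comm]

theorem simplifyRow_eq (row : List (String × String)) :
    simplifyRow row =
      [("record_id", (PySem.Dict.mk row).getD "record_id" ""),
       ("paper_id", (PySem.Dict.mk row).getD "paper_id" ""),
       ("tea_type", (PySem.Dict.mk row).getD "tea_type" ""),
       ("component_group", (PySem.Dict.mk row).getD "component_group" ""),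
       ("mechanism_or_path", (PySem.Dict.mk row).getD "mechanism_label" ""),
       ("microbial_metabolite", (PySem.Dict.mk row).getD "microbial_metabolite" ""),
       ("host_phenotype", (PySem.Dict.mk row).getD "host_phenotype" ""),
       ("evidence_level", (PySem.Dict.mk row).getD "evidence_level" ""),
       ("uncertainty_class", (PySem.Dict.mk row).getD "uncertainty_class" "")] := by
  simp only [simplifyRow, OUT_KEYS, List.map]
  rw [simplifyRow_getD "record_id" "record_id" row hmap_record_id,
      simplifyRow_getD "paper_id" "paper_id" row hmap_paper_id,
      simplifyRow_getD "tea_type" "tea_type" row hmap_tea_type,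
      simplifyRow_getD "component_group" "component_group" row hmap_component_group,
      simplifyRow_getD "mechanism_or_path" "mechanism_label" row hmap_mechanism_or_path,
      simplifyRow_getD "microbial_metabolite" "microbial_metabolite" row hmap_microbial_metabolite,
      simplifyRow_getD "host_phenotype" "host_phenotype" row hmap_host_phenotype,
      simplifyRow_getD "evidence_level" "evidence_level" row hmap_evidence_level,
      simplifyRow_getD "uncertainty_class" "uncertainty_class" row hmap_uncertainty_class]

-- the append-accumulator loop of A is a map
theorem foldl_append_map {α β : Type} (f : α → β) (xs : List α) (acc : List β) :
    xs.foldl (fun out x => out ++ [f x]) acc = acc ++ xs.map f := by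
  induction xs generalizing acc with
  | nil => simp
  | cons x xs ih => simp [List.foldl, ih]

-- ===== VERDICT =====
theorem make_simplified_table_spec : Claim_equal_make_simplified_table := by
  intro rows _
  unfold Spec_make_simplified_table make_simplified_table make_simplified_table_alt
  rw [foldl_append_map]
  simp only [List.nil_append]
  exact List.map_congr_left (fun row _ => (simplifyRow_eq row).symm)
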